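-- pv_equiv track=rewrite | github.com/zhang-yubo/DNA-Sequencing | Assembly/StringReconstruction.py | CycleStringToIndex
-- ===== SOURCE A (Python) =====
-- def CycleStringToIndex(cycle, patterns):
--     index_dict = {}
--     index_cycle = []
--     for s in cycle:
--         index_dict.update({s : [i for i, x in enumerate(patterns) if x == s]})
--     for s in cycle:
--         indexes = index_dict.get(s)
--         index_cycle.append(indexes[0])
--         indexes.remove(indexes[0])
--         index_dict.update({s : indexes})
--     return index_cycle
-- ===== SOURCE B (Python) =====
-- def CycleStringToIndex(cycle, patterns):
--     # One pass over patterns grouping indices per string; then a front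
--     # pointer per string hands out each string's occurrence indices in order.
--     pos = {}
--     for i, x in enumerate(patterns):
--         pos.setdefault(x, []).append(i)
--     ptr = {}
--     out = []
--     for s in cycle:
--         j = ptr.get(s, 0)
--         out.append(pos[s][j])
--         ptr[s] = j + 1
--     return out
-- ===== Notes on version B (the rewrite author's own statement) =====
-- stated objective: faster
-- what changed: Instead of rescanning all of patterns once per cycle element and removing consumed indices from lists, B groups pattern indices per string in one pass and serves them via a per-string front pointer, never mutating the index lists.
import Mathlib
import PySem

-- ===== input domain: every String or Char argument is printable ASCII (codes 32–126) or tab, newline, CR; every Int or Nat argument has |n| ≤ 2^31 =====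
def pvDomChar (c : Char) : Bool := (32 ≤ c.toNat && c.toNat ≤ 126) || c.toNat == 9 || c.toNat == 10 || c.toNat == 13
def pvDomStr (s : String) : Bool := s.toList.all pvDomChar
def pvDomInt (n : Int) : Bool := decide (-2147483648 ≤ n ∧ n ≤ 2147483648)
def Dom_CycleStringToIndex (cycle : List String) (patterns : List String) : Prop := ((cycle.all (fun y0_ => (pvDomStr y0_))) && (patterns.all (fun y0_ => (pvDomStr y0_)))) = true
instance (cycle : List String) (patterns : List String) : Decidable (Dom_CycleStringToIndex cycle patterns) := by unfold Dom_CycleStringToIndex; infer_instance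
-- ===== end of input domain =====

-- B replaces A's per-cycle-element rescan of patterns and list-removal by one grouping
-- pass over patterns plus a per-string front pointer (objective: faster, asymptotic).

-- ===== PORT A =====
-- [i for i, x in enumerate(patterns) if x == s]
def pvOcc (patterns : List String) (s : String) : List Int :=
  ((PySem.List.enumerate patterns).filter (fun p => p.2 == s)).map (fun p => p.1)

-- body of A's second loop: indexes = index_dict.get(s); index_cycle.append(indexes[0]);
-- indexes.remove(indexes[0]); index_dict.update({s: indexes})
def pvStepA (st : PySem.Dict String (List Int) × List Int) (s : String) :
    PySem.Dict String (List Int) × List Int :=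
  match st.1.get? s with
  | none => st                -- Python: indexes is None, indexes[0] raises (outside Pre_)
  | some indexes =>
    match PySem.List.pyGet? indexes 0 with
    | none => st              -- Python: IndexError (outside Pre_)
    | some h =>
      match PySem.List.remove? indexes h with
      | none => st            -- unreachable: h ∈ indexes
      | some rest => (st.1.insert s rest, st.2 ++ [h])

def CycleStringToIndex (cycle : List String) (patterns : List String) : List Int :=
  let index_dict := cycle.foldl (fun d s => d.insert s (pvOcc patterns s)) PySem.Dict.empty
  (cycle.foldl pvStepA (index_dict, ([] : List Int))).2

-- ===== PORT B =====
-- body of B's second loop: j = ptr.get(s, 0); out.append(pos[s][j]); ptr[s] = j + 1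
def pvStepB (pos : PySem.Dict String (List Int)) (st : PySem.Dict String Int × List Int)
    (s : String) : PySem.Dict String Int × List Int :=
  let j := st.1.getD s 0
  match pos.get? s with
  | none => st                -- Python: KeyError (outside Pre_)
  | some lst =>
    match PySem.List.pyGet? lst j with
    | none => st              -- Python: IndexError (outside Pre_)
    | some v => (st.1.insert s (j + 1), st.2 ++ [v])

def CycleStringToIndex_alt (cycle : List String) (patterns : List String) : List Int :=
  -- pos.setdefault(x, []).append(i)  ==  pos[x] = pos.get(x, []) + [i]
  let pos := (PySem.List.enumerate patterns).foldl
      (fun d p => d.modify p.2 [] (· ++ [p.1])) PySem.Dict.empty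
  (cycle.foldl (pvStepB pos) (PySem.Dict.empty, ([] : List Int))).2

-- ===== PRECONDITION & SPEC =====
-- Pre_ excludes exactly the inputs on which A raises (IndexError/TypeError: some string
-- occurs more often in cycle than in patterns); B raises there too (KeyError/IndexError).
def Pre_CycleStringToIndex (cycle : List String) (patterns : List String) : Prop :=
  ∀ s ∈ cycle, cycle.count s ≤ patterns.count s

instance (cycle : List String) (patterns : List String) :
    Decidable (Pre_CycleStringToIndex cycle patterns) := by
  unfold Pre_CycleStringToIndex; infer_instance

def pvWitness_CycleStringToIndex : List String × List String :=
  (["a", "b", "a"], ["a", "a", "b"])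

def Spec_CycleStringToIndex (cycle : List String) (patterns : List String) (out : List Int) : Prop := out = CycleStringToIndex_alt cycle patterns
instance (cycle : List String) (patterns : List String) (out : List Int) : Decidable (Spec_CycleStringToIndex cycle patterns out) := by unfold Spec_CycleStringToIndex; infer_instance

-- ===== CLAIM (what is proved, stated in full; the proofs are below) =====
def Claim_equal_CycleStringToIndex : Prop := ∀ (cycle : List String) (patterns : List String), Dom_CycleStringToIndex cycle patterns → Pre_CycleStringToIndex cycle patterns → Spec_CycleStringToIndex cycle patterns (CycleStringToIndex cycle patterns)

-- ===== LEMMAS AND PROOFS =====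

-- get? after A's dict-building loop (value depends only on the key)
theorem get?_foldl_insert_fun (l : List String) (f : String → List Int)
    (d : PySem.Dict String (List Int)) (x : String) :
    (l.foldl (fun d s => d.insert s (f s)) d).get? x
      = if x ∈ l then some (f x) else d.get? x := by
  induction l generalizing d with
  | nil => simp
  | cons a l ih =>
    simp only [List.foldl_cons, ih, List.mem_cons]
    by_cases hx : x ∈ l
    · simp [hx]
    · by_cases hxa : x = a
      · simp [hxa, PySem.Dict.get?_insert_self]
      · simp only [hx, hxa, or_self, if_false]
        exact PySem.Dict.get?_insert_of_ne _ _ hxa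

-- getD after B's grouping loop
theorem getD_posFold (l : List (Int × String)) (d : PySem.Dict String (List Int)) (c : String) :
    (l.foldl (fun d p => d.modify p.2 [] (· ++ [p.1])) d).getD c []
      = d.getD c [] ++ (l.filter (fun p => p.2 == c)).map (fun p => p.1) := by
  induction l generalizing d with
  | nil => simp
  | cons p l ih =>
    simp only [List.foldl_cons, ih, List.filter_cons, PySem.Dict.getD_modify]
    by_cases h : p.2 = c
    · simp [h]
    · simp [h, Ne.symm h]

-- contains after B's grouping loop
theorem contains_posFold (l : List (Int × String)) (d : PySem.Dict String (List Int)) (c : String) :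
    (l.foldl (fun d p => d.modify p.2 [] (· ++ [p.1])) d).contains c
      = (l.any (fun p => p.2 == c) || d.contains c) := by
  induction l generalizing d with
  | nil => simp
  | cons p l ih =>
    simp only [List.foldl_cons, ih, List.any_cons, PySem.Dict.contains_modify]
    by_cases h : c = p.2
    · simp [h]
    · have h1 : (c == p.2) = false := beq_eq_false_iff_ne.mpr h
      have h2 : (p.2 == c) = false := beq_eq_false_iff_ne.mpr (Ne.symm h)
      simp [h1, h2, Bool.or_comm]

theorem get?_eq_some_getD {d : PySem.Dict String (List Int)} {c : String}
    (h : d.contains c = true) : d.get? c = some (d.getD c []) := by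
  have h' := h
  rw [PySem.Dict.contains_eq_isSome_get?] at h'
  obtain ⟨v, hv⟩ := Option.isSome_iff_exists.mp h'
  rw [hv, PySem.Dict.getD_eq_get?_getD, hv, Option.getD_some]

theorem length_pvOcc (patterns : List String) (s : String) :
    (pvOcc patterns s).length = patterns.count s := by
  unfold pvOcc
  rw [List.length_map, ← List.countP_eq_length_filter]
  have key : ∀ (a : Int), ((PySem.List.enumerate patterns a).countP (fun p => p.2 == s))
      = patterns.count s := by
    intro a
    induction patterns generalizing a with
    | nil => simp [PySem.List.enumerate_nil]
    | cons x xs ih =>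
      rw [PySem.List.enumerate_cons]
      simp [List.countP_cons, ih, List.count_cons]
  exact key 0

-- pos.get? s for a string occurring in patterns
theorem pos_get?_of_mem (patterns : List String) (s : String) (hs : s ∈ patterns) :
    ((PySem.List.enumerate patterns).foldl
        (fun d p => d.modify p.2 [] (· ++ [p.1])) PySem.Dict.empty).get? s
      = some (pvOcc patterns s) := by
  have hany : (PySem.List.enumerate patterns).any (fun p => p.2 == s) = true := by
    have hmap := PySem.List.map_snd_enumerate (xs := patterns) (s := 0)
    rw [show (fun p : Int × String => p.2 == s) = ((· == s) ∘ (fun p : Int × String => p.2)) from rfl,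
      ← List.any_map, hmap]
    simp only [List.any_eq_true, beq_iff_eq]
    exact ⟨s, hs, rfl⟩
  have hc : ((PySem.List.enumerate patterns).foldl
      (fun d p => d.modify p.2 [] (· ++ [p.1])) PySem.Dict.empty).contains s = true := by
    rw [contains_posFold]; simp [hany]
  rw [get?_eq_some_getD hc, getD_posFold]
  simp [pvOcc, PySem.Dict.getD_empty]

-- main loop equivalence, by induction over the remaining cycle
theorem loop_eq (patterns : List String) (pos : PySem.Dict String (List Int))
    (rest : List String) (dA : PySem.Dict String (List Int)) (ptr : PySem.Dict String Int)
    (out : List Int)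
    (hpos : ∀ t ∈ rest, pos.get? t = some (pvOcc patterns t))
    (hinv : ∀ t ∈ rest, ∃ k : Nat, ptr.getD t 0 = (k : Int)
        ∧ dA.get? t = some ((pvOcc patterns t).drop k)
        ∧ k + rest.count t ≤ (pvOcc patterns t).length) :
    (rest.foldl pvStepA (dA, out)).2 = (rest.foldl (pvStepB pos) (ptr, out)).2 := by
  induction rest generalizing dA ptr out with
  | nil => rfl
  | cons s rest ih =>
    obtain ⟨k, hk, hA, hlen⟩ := hinv s (List.mem_cons_self ..)
    have hkl : k < (pvOcc patterns s).length := by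
      have h1 : 1 ≤ (s :: rest).count s := by simp
      omega
    have hdrop := List.drop_eq_getElem_cons hkl
    have hstepA : pvStepA (dA, out) s
        = (dA.insert s ((pvOcc patterns s).drop (k + 1)), out ++ [(pvOcc patterns s)[k]]) := by
      have hget : PySem.List.pyGet? ((pvOcc patterns s).drop k) 0
          = some (pvOcc patterns s)[k] := by
        rw [hdrop]; simp [PySem.List.pyGet?, PySem.List.pyIdx?, hkl]
      have hrem : PySem.List.remove? ((pvOcc patterns s).drop k) (pvOcc patterns s)[k]
          = some ((pvOcc patterns s).drop (k + 1)) := by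
        rw [hdrop]; exact PySem.List.remove?_cons_self ..
      unfold pvStepA
      rw [hA]
      simp only [hget, hrem]
    have hstepB : pvStepB pos (ptr, out) s
        = (ptr.insert s ((k : Int) + 1), out ++ [(pvOcc patterns s)[k]]) := by
      unfold pvStepB
      simp only [hpos s (List.mem_cons_self ..), hk, PySem.List.pyGet?_natCast,
        List.getElem?_eq_getElem hkl]
    simp only [List.foldl_cons, hstepA, hstepB]
    apply ih
    · intro t ht; exact hpos t (List.mem_cons_of_mem _ ht)
    · intro t ht
      by_cases hts : t = s
      · subst hts
        refine ⟨k + 1, ?_, PySem.Dict.get?_insert_self .., ?_⟩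
        · rw [PySem.Dict.getD_insert]; simp
        · have hcnt : (t :: rest).count t = rest.count t + 1 := by simp
          omega
      · obtain ⟨k', hk', hA', hlen'⟩ := hinv t (List.mem_cons_of_mem _ ht)
        refine ⟨k', ?_, ?_, ?_⟩
        · rw [PySem.Dict.getD_insert]; simp [hts, hk']
        · rw [PySem.Dict.get?_insert_of_ne _ _ hts]; exact hA'
        · have hcnt : (s :: rest).count t = rest.count t := by
            simp [Ne.symm hts]
          omega

-- ===== VERDICT (by name: the statement is the Claim_ definition above) =====
theorem CycleStringToIndex_spec : Claim_equal_CycleStringToIndex := by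
  intro cycle patterns _ hpre
  unfold Spec_CycleStringToIndex CycleStringToIndex CycleStringToIndex_alt
  apply loop_eq
  · intro s hs
    apply pos_get?_of_mem
    have h1 : 1 ≤ cycle.count s := List.one_le_count_iff.mpr hs
    have h2 := hpre s hs
    exact List.one_le_count_iff.mp (le_trans h1 h2)
  · intro s hs
    refine ⟨0, by simp [PySem.Dict.getD_empty], ?_, ?_⟩
    · rw [get?_foldl_insert_fun]; simp [hs]
    · rw [length_pvOcc]; simpa using hpre s hs
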